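-- pv_equiv track=rewrite | github.com/snoonetIRC/ProfSnoo | src/modules/teach.py | format_irc
-- ===== SOURCE A (Python) =====
-- tags  = [
--     'subject',
--     'topic',
--     'objective',
--     'notice',
--     'irc',
--     'cmd',
--     'bot',
--     'req',
--     'opt'
-- ]
--
-- def format_irc(output):
--
--     out = output
--
--     formats = {
--         '<b>' : '\x02',
--         '</b>' : '\x02',
--         '<cmd>' : '\x02\x034',
--         '</cmd>' : '\x03\x02',
--         '<u>' : '\x1F',
--         '</u>' : '\x1F',
--         '<req>' : '\x1F',
--         '</req>' : '\x1F',
--         '<opt>' : '[\x1F',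
--         '</opt>' : '\x1F]'
--     }
--
--     for form in formats:
--         out = out.replace(form, formats.get(form))
--
--     for tag in tags:
--         out = out.replace('<' + tag + '>', ''); out = out.replace('</' + tag + '>', '')
--
--     return out
-- ===== SOURCE B (Python) =====
-- import re
--
-- tags  = [
--     'subject',
--     'topic',
--     'objective',
--     'notice',
--     'irc',
--     'cmd',
--     'bot',
--     'req',
--     'opt'
-- ]
--
-- def format_irc(output):
--     # one merged table: every tag literal -> '', then the IRC format codes overlaid
--     table = {}
--     for tag in tags:
--         table['<' + tag + '>'] = ''
--         table['</' + tag + '>'] = ''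
--     table.update({
--         '<b>' : '\x02',
--         '</b>' : '\x02',
--         '<cmd>' : '\x02\x034',
--         '</cmd>' : '\x03\x02',
--         '<u>' : '\x1F',
--         '</u>' : '\x1F',
--         '<req>' : '\x1F',
--         '</req>' : '\x1F',
--         '<opt>' : '[\x1F',
--         '</opt>' : '\x1F]'
--     })
--     pattern = re.compile('|'.join(re.escape(k) for k in table))
--     return pattern.sub(lambda m: table[m.group(0)], output)
-- ===== Notes on version B (the rewrite author's own statement) =====
-- stated objective: idiomatic
-- what changed: Replaces A's ~19 sequential full-string str.replace passes by one merged literal->replacement dict (tags erased first, format codes overlaid so cmd/req/opt win) and a single left-to-right re.sub scan with a lookup callback.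
-- outside the precondition, e.g. on format_irc('<cm<subject>d>'): A returns '', B returns '<cmd>'
import Mathlib
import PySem

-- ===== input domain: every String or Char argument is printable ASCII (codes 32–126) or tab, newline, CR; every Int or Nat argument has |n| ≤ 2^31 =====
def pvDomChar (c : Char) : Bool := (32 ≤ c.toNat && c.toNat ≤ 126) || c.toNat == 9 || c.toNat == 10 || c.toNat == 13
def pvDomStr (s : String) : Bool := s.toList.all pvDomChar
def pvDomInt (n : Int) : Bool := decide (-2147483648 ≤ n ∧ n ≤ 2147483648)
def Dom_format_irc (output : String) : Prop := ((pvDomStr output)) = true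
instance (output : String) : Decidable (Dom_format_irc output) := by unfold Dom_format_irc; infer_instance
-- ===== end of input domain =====

-- B replaces A's ~19 sequential full-string replace passes by one merged literal→code table and a
-- single left-to-right scan (the port of Source B's re.sub); objective: a single-pass idiomatic rewrite.

-- ===== PORT A =====
def pvTags : List String :=
  ["subject", "topic", "objective", "notice", "irc", "cmd", "bot", "req", "opt"]

def pvFormats : List (String × String) :=
  [("<b>", "\x02"), ("</b>", "\x02"), ("<cmd>", "\x02\x034"), ("</cmd>", "\x03\x02"),
   ("<u>", "\x1F"), ("</u>", "\x1F"), ("<req>", "\x1F"), ("</req>", "\x1F"),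
   ("<opt>", "[\x1F"), ("</opt>", "\x1F]")]

def format_irc (output : String) : String :=
  let out := output
  let out := pvFormats.foldl (fun o fr => PySem.Str.replace o fr.1 fr.2) out
  let out := pvTags.foldl
    (fun o tag => PySem.Str.replace (PySem.Str.replace o ("<" ++ tag ++ ">") "") ("</" ++ tag ++ ">") "") out
  out

-- ===== PORT B =====
-- Source B: table = {} ; every '<tag>'/'</tag>' ↦ '' ; then table.update(formats)
def pvTable : PySem.Dict String String :=
  pvFormats.foldl (fun d fr => d.insert fr.1 fr.2)
    (pvTags.foldl (fun d tag => (d.insert ("<" ++ tag ++ ">") "").insert ("</" ++ tag ++ ">") "") PySem.Dict.empty)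

def pvTableL : List (List Char × List Char) := pvTable.items.map (fun kv => (kv.1.toList, kv.2.toList))

theorem pvTableL_key_ne_nil : ∀ pr ∈ pvTableL, pr.1 ≠ [] := by decide

-- the single left-to-right scan of Source B's re.sub: at each position the (unique) matching literal
-- is looked up in the table and its replacement emitted, otherwise the character is copied
def pvScan : List Char → List Char
  | [] => []
  | c :: t =>
    match h : pvTableL.find? (fun pr => pr.1.isPrefixOf (c :: t)) with
    | some pr => pr.2 ++ pvScan ((c :: t).drop pr.1.length)
    | none => c :: pvScan t
termination_by s => s.length
decreasing_by
  · have hmem := List.mem_of_find?_eq_some h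
    have hk := pvTableL_key_ne_nil _ hmem
    have h1 : 0 < pr.1.length := List.length_pos_iff.mpr hk
    simp only [List.length_drop, List.length_cons]
    omega
  · simp

def format_irc_alt (output : String) : String := String.ofList (pvScan output.toList)

-- ===== PRECONDITION & SPEC =====
-- chars that may immediately PRECEDE a deletable tag literal only when no tag-char follows it:
-- '<', '/', and the letters occurring in the tag words
def pvS : List Char := ['<', '/', 'b', 'c', 'd', 'e', 'i', 'j', 'm', 'n', 'o', 'p', 'q', 'r', 's', 't', 'u', 'v']
-- chars that may FOLLOW it only when no pvS-char precedes it
def pvT : List Char := '>' :: pvS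

def pvE18 : List (List Char) :=
  (pvTags.map (fun t => '<' :: (t.toList ++ ['>']))) ++ (pvTags.map (fun t => '<' :: '/' :: (t.toList ++ ['>'])))

def pvSuccT : List Char → Bool
  | [] => false
  | d :: _ => pvT.contains d

def pvNoEPb (t : List Char) : Bool :=
  pvE18.all (fun L => !(L.isPrefixOf t) || !(pvSuccT (t.drop L.length)))

def pvInv : List Char → Bool
  | [] => true
  | c :: t => (!(pvS.contains c) || pvNoEPb t) && pvInv t

-- Pre_ excludes strings in which some '<tag>'/'</tag>' literal of the tags list is immediately
-- preceded by a tag-alphabet character AND immediately followed by one: there A's sequence of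
-- global replaces can splice the surrounding text into a brand-new tag (a multi-pass cascade
-- whose result is accidental), while B's single scan leaves the spliced text alone.
def Pre_format_irc (output : String) : Prop := pvInv output.toList = true
instance (output : String) : Decidable (Pre_format_irc output) := by unfold Pre_format_irc; infer_instance

def pvWitness_format_irc : String := "Use <cmd>help</cmd> for <subject>, <opt>now</opt> or <b>later</b>"

def Spec_format_irc (output : String) (out : String) : Prop := out = format_irc_alt output
instance (output : String) (out : String) : Decidable (Spec_format_irc output out) := by unfold Spec_format_irc; infer_instance

-- ===== CLAIM (what is proved, stated in full; the proofs are below) =====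
def Claim_equal_format_irc : Prop := ∀ (output : String), Dom_format_irc output → Pre_format_irc output → Spec_format_irc output (format_irc output)

-- ===== LEMMAS AND PROOFS =====

-- The 28 replace passes of A, in A's order (10 format passes, then open/close erasure per tag)
def pvL28 : List (List Char × List Char) :=
  (pvFormats.map (fun fr => (fr.1.toList, fr.2.toList))) ++
  (pvTags.flatMap (fun tag => [(("<" ++ tag ++ ">").toList, ("" : String).toList),
                               (("</" ++ tag ++ ">").toList, ("" : String).toList)]))

-- literal images of pvTableL / pvL28 / the key list (proved equal below); kernel-friendly for decide
def pvTableLit : List (List Char × List Char) :=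
  [(['<', 's', 'u', 'b', 'j', 'e', 'c', 't', '>'], []),
   (['<', '/', 's', 'u', 'b', 'j', 'e', 'c', 't', '>'], []),
   (['<', 't', 'o', 'p', 'i', 'c', '>'], []),
   (['<', '/', 't', 'o', 'p', 'i', 'c', '>'], []),
   (['<', 'o', 'b', 'j', 'e', 'c', 't', 'i', 'v', 'e', '>'], []),
   (['<', '/', 'o', 'b', 'j', 'e', 'c', 't', 'i', 'v', 'e', '>'], []),
   (['<', 'n', 'o', 't', 'i', 'c', 'e', '>'], []),
   (['<', '/', 'n', 'o', 't', 'i', 'c', 'e', '>'], []),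
   (['<', 'i', 'r', 'c', '>'], []),
   (['<', '/', 'i', 'r', 'c', '>'], []),
   (['<', 'c', 'm', 'd', '>'], ['\x02', '\x03', '4']),
   (['<', '/', 'c', 'm', 'd', '>'], ['\x03', '\x02']),
   (['<', 'b', 'o', 't', '>'], []),
   (['<', '/', 'b', 'o', 't', '>'], []),
   (['<', 'r', 'e', 'q', '>'], ['\x1f']),
   (['<', '/', 'r', 'e', 'q', '>'], ['\x1f']),
   (['<', 'o', 'p', 't', '>'], ['[', '\x1f']),
   (['<', '/', 'o', 'p', 't', '>'], ['\x1f', ']']),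
   (['<', 'b', '>'], ['\x02']),
   (['<', '/', 'b', '>'], ['\x02']),
   (['<', 'u', '>'], ['\x1f']),
   (['<', '/', 'u', '>'], ['\x1f'])]

def pvL28L : List (List Char × List Char) :=
  [(['<', 'b', '>'], ['\x02']),
   (['<', '/', 'b', '>'], ['\x02']),
   (['<', 'c', 'm', 'd', '>'], ['\x02', '\x03', '4']),
   (['<', '/', 'c', 'm', 'd', '>'], ['\x03', '\x02']),
   (['<', 'u', '>'], ['\x1f']),
   (['<', '/', 'u', '>'], ['\x1f']),
   (['<', 'r', 'e', 'q', '>'], ['\x1f']),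
   (['<', '/', 'r', 'e', 'q', '>'], ['\x1f']),
   (['<', 'o', 'p', 't', '>'], ['[', '\x1f']),
   (['<', '/', 'o', 'p', 't', '>'], ['\x1f', ']']),
   (['<', 's', 'u', 'b', 'j', 'e', 'c', 't', '>'], []),
   (['<', '/', 's', 'u', 'b', 'j', 'e', 'c', 't', '>'], []),
   (['<', 't', 'o', 'p', 'i', 'c', '>'], []),
   (['<', '/', 't', 'o', 'p', 'i', 'c', '>'], []),
   (['<', 'o', 'b', 'j', 'e', 'c', 't', 'i', 'v', 'e', '>'], []),
   (['<', '/', 'o', 'b', 'j', 'e', 'c', 't', 'i', 'v', 'e', '>'], []),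
   (['<', 'n', 'o', 't', 'i', 'c', 'e', '>'], []),
   (['<', '/', 'n', 'o', 't', 'i', 'c', 'e', '>'], []),
   (['<', 'i', 'r', 'c', '>'], []),
   (['<', '/', 'i', 'r', 'c', '>'], []),
   (['<', 'c', 'm', 'd', '>'], []),
   (['<', '/', 'c', 'm', 'd', '>'], []),
   (['<', 'b', 'o', 't', '>'], []),
   (['<', '/', 'b', 'o', 't', '>'], []),
   (['<', 'r', 'e', 'q', '>'], []),
   (['<', '/', 'r', 'e', 'q', '>'], []),
   (['<', 'o', 'p', 't', '>'], []),
   (['<', '/', 'o', 'p', 't', '>'], [])]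

def pvKeysL : List (List Char) :=
  [['<', 's', 'u', 'b', 'j', 'e', 'c', 't', '>'],
   ['<', '/', 's', 'u', 'b', 'j', 'e', 'c', 't', '>'],
   ['<', 't', 'o', 'p', 'i', 'c', '>'],
   ['<', '/', 't', 'o', 'p', 'i', 'c', '>'],
   ['<', 'o', 'b', 'j', 'e', 'c', 't', 'i', 'v', 'e', '>'],
   ['<', '/', 'o', 'b', 'j', 'e', 'c', 't', 'i', 'v', 'e', '>'],
   ['<', 'n', 'o', 't', 'i', 'c', 'e', '>'],
   ['<', '/', 'n', 'o', 't', 'i', 'c', 'e', '>'],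
   ['<', 'i', 'r', 'c', '>'],
   ['<', '/', 'i', 'r', 'c', '>'],
   ['<', 'c', 'm', 'd', '>'],
   ['<', '/', 'c', 'm', 'd', '>'],
   ['<', 'b', 'o', 't', '>'],
   ['<', '/', 'b', 'o', 't', '>'],
   ['<', 'r', 'e', 'q', '>'],
   ['<', '/', 'r', 'e', 'q', '>'],
   ['<', 'o', 'p', 't', '>'],
   ['<', '/', 'o', 'p', 't', '>'],
   ['<', 'b', '>'],
   ['<', '/', 'b', '>'],
   ['<', 'u', '>'],
   ['<', '/', 'u', '>']]

def PassOK (q r : List Char) : Prop :=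
  q ∈ pvKeysL ∧ (r = [] → q ∈ pvE18) ∧ ∀ a ∈ r, a ∉ pvT ∧ a ∉ pvS

def NoEP (t : List Char) : Prop :=
  ∀ L ∈ pvE18, L <+: t → ∀ d, (t.drop L.length).head? = some d → d ∉ pvT

def pvStep (s : List Char) (qr : List Char × List Char) : List Char :=
  PySem.Chars.replace s qr.1 qr.2

-- ---- decidable / computed table facts ----
set_option maxRecDepth 8000 in
theorem pvEQ1 : pvTableL = pvTableLit := by decide
set_option maxRecDepth 8000 in
theorem pvEQ2 : pvL28 = pvL28L := by decide
set_option maxRecDepth 8000 in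
theorem pvKM : pvKeysL = pvTableLit.map (·.1) := by decide
set_option maxRecDepth 8000 in
theorem pvA1 : ∀ qr ∈ pvL28L, qr.1 ∈ pvKeysL := by decide
set_option maxRecDepth 8000 in
theorem pvA2 : ∀ qr ∈ pvL28L, qr.2 = [] → qr.1 ∈ pvE18 := by decide
theorem pvA3 : (pvL28L.all (fun qr => qr.2.all (fun a => !(pvT.contains a) && !(pvS.contains a)))) = true := by rfl
set_option maxRecDepth 8000 in
theorem pvKB : ∀ p ∈ pvKeysL, p ≠ [] ∧ p.head? = some '<' ∧ '<' ∉ p.drop 1 ∧ 2 ≤ p.length := by decide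
set_option maxRecDepth 8000 in
theorem pvPW : ∀ a ∈ pvKeysL, ∀ b ∈ pvKeysL, a ≠ b → a.isPrefixOf b = false := by decide
theorem pvKC : (pvKeysL.all (fun p => (List.range p.length).all
    (fun i => (i == 0) || ((p.getD i ' ') ∈ pvT && ((i + 1 == p.length) || (p.getD i ' ') ∈ pvS))))) = true := by decide
set_option maxRecDepth 8000 in
theorem pvE18K : ∀ L ∈ pvE18, L ∈ pvKeysL := by decide
set_option maxRecDepth 8000 in
theorem pvTF : ∀ pr ∈ pvTableLit, (pvL28L.dropWhile (fun qr => !(qr.1 == pr.1))).head? = some pr := by decide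
set_option maxRecDepth 8000 in
theorem pvTK : ∀ pr ∈ pvTableLit, pr.1 ∈ pvKeysL := by decide
theorem pvTV : (pvTableLit.all (fun pr => pr.2.all (fun a => !(pvT.contains a) && !(pvS.contains a)))) = true := by rfl
theorem pv_lt_mem_T : '<' ∈ pvT := by decide
theorem pv_lt_mem_S : '<' ∈ pvS := by decide

theorem pv_not_mem_of_contains {l : List Char} {a : Char} (h : l.contains a = false) : a ∉ l := by
  intro hm
  simp at h
  exact h hm

-- Prop form of pvA3 / pvTV
theorem pv_pass_ok : ∀ qr ∈ pvL28L, PassOK qr.1 qr.2 := by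
  intro qr hqr
  refine ⟨pvA1 qr hqr, pvA2 qr hqr, ?_⟩
  intro a ha
  have h1 := List.all_eq_true.mp (List.all_eq_true.mp pvA3 qr hqr) a ha
  simp only [Bool.and_eq_true, Bool.not_eq_true'] at h1
  exact ⟨pv_not_mem_of_contains h1.1, pv_not_mem_of_contains h1.2⟩

theorem pv_table_vals : ∀ pr ∈ pvTableLit, ∀ a ∈ pr.2, a ∉ pvT ∧ a ∉ pvS := by
  intro pr hpr a ha
  have h1 := List.all_eq_true.mp (List.all_eq_true.mp pvTV pr hpr) a ha
  simp only [Bool.and_eq_true, Bool.not_eq_true'] at h1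
  exact ⟨pv_not_mem_of_contains h1.1, pv_not_mem_of_contains h1.2⟩

-- character facts about the key literals, at positions i ≥ 1
theorem pv_key_chars : ∀ p ∈ pvKeysL, ∀ i, 1 ≤ i → i < p.length → ∀ d, p[i]? = some d →
    d ∈ pvT ∧ (i + 1 < p.length → d ∈ pvS) := by
  intro p hp i h1 h2 d hd
  have h3 := List.all_eq_true.mp (List.all_eq_true.mp pvKC p hp) i (List.mem_range.mpr h2)
  have hgd : p.getD i ' ' = d := by
    rw [List.getD_eq_getElem?_getD, hd]
    rfl
  rw [hgd] at h3
  simp only [Bool.or_eq_true, Bool.and_eq_true, beq_iff_eq, decide_eq_true_eq] at h3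
  rcases h3 with h3 | ⟨hT, h4⟩
  · omega
  · refine ⟨hT, fun hlt => ?_⟩
    rcases h4 with h4 | h4
    · omega
    · exact h4

-- ---- recursion equations for PySem.Chars.replace (nonempty pattern) ----
theorem pvGoAcc (old new : List Char) : ∀ fuel l acc,
    PySem.Chars.replace.go old new fuel l acc = acc.reverse ++ PySem.Chars.replace.go old new fuel l []
  | 0, l, acc => by simp [PySem.Chars.replace.go]
  | fuel+1, [], acc => by simp [PySem.Chars.replace.go]
  | fuel+1, c :: t, acc => by
      simp only [PySem.Chars.replace.go]
      split
      · rw [pvGoAcc old new fuel _ (new.reverse ++ acc), pvGoAcc old new fuel _ (new.reverse ++ [])]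
        simp
      · rw [pvGoAcc old new fuel t (c :: acc), pvGoAcc old new fuel t (c :: [])]
        simp

theorem pvGoFuel (old new : List Char) (hold : old ≠ []) : ∀ f1 f2 l, l.length ≤ f1 → l.length ≤ f2 →
    PySem.Chars.replace.go old new f1 l [] = PySem.Chars.replace.go old new f2 l []
  | f1, f2, [] => by
      intro h1 h2
      cases f1 <;> cases f2 <;> simp [PySem.Chars.replace.go]
  | f1+1, f2+1, c :: t => by
      intro h1 h2
      simp only [PySem.Chars.replace.go]
      split
      · rw [pvGoAcc old new f1, pvGoAcc old new f2]
        congr 1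
        have hol : 1 ≤ old.length := by
          cases old with
          | nil => exact absurd rfl hold
          | cons a b => simp
        exact pvGoFuel old new hold f1 f2 _ (by simp only [List.length_drop, List.length_cons] at *; omega)
          (by simp only [List.length_drop, List.length_cons] at *; omega)
      · rw [pvGoAcc old new f1, pvGoAcc old new f2]
        congr 1
        exact pvGoFuel old new hold f1 f2 t (by simp at h1; omega) (by simp at h2; omega)
  | 0, f2, c :: t => by intro h1; simp at h1
  | f1+1, 0, c :: t => by intro _ h2; simp at h2

theorem pvRep_nil (old new : List Char) (h : old ≠ []) : PySem.Chars.replace [] old new = [] := by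
  simp [PySem.Chars.replace, List.isEmpty_iff, h, PySem.Chars.replace.go]

theorem pvRep_cons_neg (old new : List Char) (c : Char) (t : List Char) (h : old ≠ [])
    (hnp : old.isPrefixOf (c :: t) = false) :
    PySem.Chars.replace (c :: t) old new = c :: PySem.Chars.replace t old new := by
  simp only [PySem.Chars.replace, List.isEmpty_iff, h, List.length_cons, if_false]
  conv_lhs => rw [show t.length + 1 = Nat.succ t.length from rfl]
  simp only [PySem.Chars.replace.go]
  rw [if_neg (by simp [hnp])]
  rw [pvGoAcc]
  simp

theorem pvRep_cons_pos (old new s : List Char) (h : old ≠ [])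
    (hp : old.isPrefixOf s = true) :
    PySem.Chars.replace s old new = new ++ PySem.Chars.replace (s.drop old.length) old new := by
  have hne : ¬ (old.isEmpty = true) := by simp [List.isEmpty_iff, h]
  cases s with
  | nil =>
      exfalso
      exact h (List.prefix_nil.mp (List.isPrefixOf_iff_prefix.mp hp))
  | cons c t =>
      simp only [PySem.Chars.replace, List.isEmpty_iff, h, List.length_cons, if_false]
      conv_lhs => rw [show t.length + 1 = Nat.succ t.length from rfl]
      simp only [PySem.Chars.replace.go]
      rw [if_pos hp, pvGoAcc]
      simp only [List.append_nil, List.reverse_reverse]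
      congr 1
      have hol : 1 ≤ old.length := by
        cases old with
        | nil => exact absurd rfl h
        | cons a b => simp
      exact pvGoFuel old new h t.length _ _ (by simp; omega) le_rfl

-- ---- bridging the Bool precondition to Props ----
theorem pvNoEPb_iff (t : List Char) : pvNoEPb t = true ↔ NoEP t := by
  simp only [pvNoEPb, NoEP, List.all_eq_true, Bool.or_eq_true, Bool.not_eq_true']
  constructor
  · intro h L hL hpre d hd
    rcases h L hL with h1 | h1
    · rw [List.isPrefixOf_iff_prefix.mpr hpre] at h1; cases h1
    · cases ht : t.drop L.length with
      | nil => rw [ht] at hd; cases hd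
      | cons e rest =>
          rw [ht] at hd h1
          simp only [List.head?_cons, Option.some.injEq] at hd
          simp only [pvSuccT] at h1
          rw [hd] at h1
          simpa using h1
  · intro h L hL
    by_cases hp : L.isPrefixOf t = true
    · right
      cases ht : t.drop L.length with
      | nil => simp [pvSuccT]
      | cons e rest =>
          simp only [pvSuccT]
          have he := h L hL (List.isPrefixOf_iff_prefix.mp hp) e (by rw [ht]; rfl)
          simpa using he
    · exact Or.inl (Bool.eq_false_iff.mpr hp)

theorem pvInv_cons (c : Char) (t : List Char) :
    pvInv (c :: t) = true ↔ ((c ∈ pvS → NoEP t) ∧ pvInv t = true) := by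
  simp only [pvInv, Bool.and_eq_true, Bool.or_eq_true, Bool.not_eq_true']
  constructor
  · rintro ⟨h1 | h1, h2⟩
    · exact ⟨fun hc => absurd hc (by simpa using h1), h2⟩
    · exact ⟨fun _ => (pvNoEPb_iff t).mp h1, h2⟩
  · rintro ⟨h1, h2⟩
    refine ⟨?_, h2⟩
    by_cases hc : c ∈ pvS
    · exact Or.inr ((pvNoEPb_iff t).mpr (h1 hc))
    · exact Or.inl (by simpa using hc)

theorem pvInv_suffix : ∀ u v : List Char, pvInv (u ++ v) = true → pvInv v = true := by
  intro u
  induction u with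
  | nil => intro v h; exact h
  | cons a u' ih => intro v h; exact ih v ((pvInv_cons a (u' ++ v)).mp h).2

-- ---- skip lemmas: a pass cannot match inside a region without '<' / inside another key ----
theorem pvRep_skip (q r u x : List Char) (hqh : q.head? = some '<') (hqn : q ≠ [])
    (hu : '<' ∉ u) : PySem.Chars.replace (u ++ x) q r = u ++ PySem.Chars.replace x q r := by
  induction u with
  | nil => rfl
  | cons a u' ih =>
      have ha : a ≠ '<' := by intro h; exact hu (by simp [h])
      have hnp : q.isPrefixOf (a :: (u' ++ x)) = false := by
        apply Bool.eq_false_iff.mpr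
        intro hcp
        have hpre := List.isPrefixOf_iff_prefix.mp hcp
        cases q with
        | nil => exact hqn rfl
        | cons q0 q1 =>
            have hq0 : q0 = '<' := by simpa using hqh
            exact ha ((List.cons_prefix_cons.mp hpre).1.symm.trans hq0)
      rw [List.cons_append]
      rw [pvRep_cons_neg q r a (u' ++ x) hqn hnp]
      rw [ih (fun h => hu (List.mem_cons_of_mem _ h))]
      rfl

theorem pv_not_prefix_of_ne (a b : List Char) (ha : a ∈ pvKeysL) (hb : b ∈ pvKeysL)
    (hne : a ≠ b) : ¬ a <+: b := by
  intro hp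
  have := pvPW a ha b hb hne
  rw [List.isPrefixOf_iff_prefix.mpr hp] at this
  cases this

theorem pvRep_skip_pattern (p q r x : List Char) (hp : p ∈ pvKeysL) (hq : q ∈ pvKeysL) (hne : q ≠ p) :
    PySem.Chars.replace (p ++ x) q r = p ++ PySem.Chars.replace x q r := by
  obtain ⟨hpn, hph, hplt, -⟩ := pvKB p hp
  obtain ⟨hqn, hqh, -, -⟩ := pvKB q hq
  cases p with
  | nil => exact absurd rfl hpn
  | cons p0 p1 =>
      have hp0 : p0 = '<' := by simpa using hph
      have hnp : q.isPrefixOf ((p0 :: p1) ++ x) = false := by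
        apply Bool.eq_false_iff.mpr
        intro hcp
        have h1 : q <+: (p0 :: p1) ++ x := List.isPrefixOf_iff_prefix.mp hcp
        have h2 : (p0 :: p1) <+: (p0 :: p1) ++ x := List.prefix_append _ _
        rcases List.prefix_or_prefix_of_prefix h1 h2 with h | h
        · exact pv_not_prefix_of_ne q (p0 :: p1) hq hp hne h
        · exact pv_not_prefix_of_ne (p0 :: p1) q hp hq (fun he => hne he.symm) h
      rw [List.cons_append]
      rw [pvRep_cons_neg q r p0 (p1 ++ x) hqn (by exact hnp)]
      have hrest : PySem.Chars.replace (p1 ++ x) q r = p1 ++ PySem.Chars.replace x q r :=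
        pvRep_skip q r p1 x hqh hqn (by simpa using hplt)
      rw [hrest, List.cons_append]

-- ---- the invariant machinery ----
-- W: under the precondition, a pass never creates a key-tail prefix where none was
theorem pvW : ∀ n t p i q r, t.length ≤ n → p ∈ pvKeysL → 1 ≤ i → i < p.length →
    PassOK q r → pvInv t = true → NoEP t → ¬ (p.drop i) <+: t →
    ¬ (p.drop i) <+: PySem.Chars.replace t q r := by
  intro n
  induction n with
  | zero =>
      intro t p i q r hlen hp hi1 hi2 hq _ _ _
      have ht : t = [] := List.length_eq_zero_iff.mp (Nat.le_zero.mp hlen)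
      obtain ⟨hqkey, -, -⟩ := hq
      obtain ⟨hqn, -, -, -⟩ := pvKB q hqkey
      subst ht
      rw [pvRep_nil q r hqn]
      intro hcon
      exact absurd (List.prefix_nil.mp hcon) (by rw [List.drop_eq_nil_iff]; omega)
  | succ n ih =>
      intro t p i q r hlen hp hi1 hi2 hq hinv hne hnp
      obtain ⟨hqkey, hqe, hqr⟩ := hq
      obtain ⟨hqn, hqh, hqlt, hqlen⟩ := pvKB q hqkey
      -- the head character of p.drop i
      cases hxd : p.drop i with
      | nil => exact absurd (List.drop_eq_nil_iff.mp hxd) (by omega)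
      | cons x0 x' =>
          have hx0 : p[i]? = some x0 := by
            rw [← List.head?_drop, hxd]; rfl
          obtain ⟨hx0T, hx0S⟩ := pv_key_chars p hp i hi1 hi2 x0 hx0
          cases t with
          | nil =>
              rw [pvRep_nil q r hqn]
              intro hcon
              cases List.prefix_nil.mp hcon
          | cons c t0 =>
              by_cases hpf : q.isPrefixOf (c :: t0) = true
              · -- the pass matches at the head
                cases hr : r with
                | cons d r' =>
                    rw [pvRep_cons_pos q (d :: r') (c :: t0) hqn hpf]
                    intro hcon
                    rw [List.cons_append] at hcon
                    have hd0 : x0 = d := (List.cons_prefix_cons.mp hcon).1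
                    have hdT := (hqr d (by rw [hr]; exact List.mem_cons_self ..)).1
                    rw [← hd0] at hdT
                    exact hdT hx0T
                | nil =>
                    subst hr
                    have hq18 := hqe rfl
                    rw [pvRep_cons_pos q [] (c :: t0) hqn hpf, List.nil_append]
                    have hsucc := hne q hq18 (List.isPrefixOf_iff_prefix.mp hpf)
                    cases ht2 : (c :: t0).drop q.length with
                    | nil =>
                        rw [pvRep_nil q [] hqn]
                        intro hcon
                        cases List.prefix_nil.mp hcon
                    | cons e t2' =>
                        have he : e ∉ pvT := hsucc e (by rw [ht2]; rfl)
                        have hnf : q.isPrefixOf (e :: t2') = false := by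
                          apply Bool.eq_false_iff.mpr
                          intro hcp
                          cases q with
                          | nil => exact hqn rfl
                          | cons q0 q1 =>
                              have hq0 : q0 = '<' := by simpa using hqh
                              have := (List.cons_prefix_cons.mp (List.isPrefixOf_iff_prefix.mp hcp)).1
                              rw [hq0] at this
                              exact he (this ▸ pv_lt_mem_T)
                        rw [pvRep_cons_neg q [] e t2' hqn hnf]
                        intro hcon
                        have := (List.cons_prefix_cons.mp hcon).1
                        exact he (this ▸ hx0T)
              · -- no match at the head: the head character is copied
                have hpf' : q.isPrefixOf (c :: t0) = false := Bool.eq_false_iff.mpr hpf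
                rw [pvRep_cons_neg q r c t0 hqn hpf']
                rw [hxd] at hnp
                intro hcon
                obtain ⟨hx0c, hx'⟩ := List.cons_prefix_cons.mp hcon
                cases hx'e : x' with
                | nil =>
                    subst hx'e
                    exact hnp (List.cons_prefix_cons.mpr ⟨hx0c, List.nil_prefix⟩)
                | cons y ys =>
                    -- x' = p.drop (i+1) is again a key tail
                    have hxt : p.drop (i + 1) = x' := by
                      rw [← List.tail_drop, hxd]; rfl
                    have hi2' : i + 1 < p.length := by
                      by_contra hge
                      have : p.drop (i + 1) = [] := List.drop_eq_nil_iff.mpr (by omega)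
                      rw [hxt, hx'e] at this
                      cases this
                    have hx0Smem : x0 ∈ pvS := hx0S hi2'
                    have hinv0 := (pvInv_cons c t0).mp hinv
                    have hne0 : NoEP t0 := hinv0.1 (hx0c ▸ hx0Smem)
                    have hnp' : ¬ (p.drop (i + 1)) <+: t0 := by
                      rw [hxt]
                      intro hpp
                      exact hnp (List.cons_prefix_cons.mpr ⟨hx0c, hpp⟩)
                    have := ih t0 p (i + 1) q r (by simp at hlen; omega) hp (by omega) hi2'
                      ⟨hqkey, hqe, hqr⟩ hinv0.2 hne0 hnp'
                    rw [hxt] at this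
                    exact this hx'

-- NE: a pass preserves "no dangerous erasable literal at the head"
theorem pvNE (t q r : List Char) (hq : PassOK q r) (hinv : pvInv t = true) (hne : NoEP t) :
    NoEP (PySem.Chars.replace t q r) := by
  obtain ⟨hqkey, hqe, hqr⟩ := hq
  obtain ⟨hqn, hqh, hqlt, hqlen⟩ := pvKB q hqkey
  cases t with
  | nil =>
      rw [pvRep_nil q r hqn]
      intro L hL hLp d hd
      obtain ⟨hLn, -, -, -⟩ := pvKB L (pvE18K L hL)
      exact absurd (List.prefix_nil.mp hLp) hLn
  | cons c t0 =>
      by_cases hpf : q.isPrefixOf (c :: t0) = true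
      · cases hr : r with
        | cons d r' =>
            rw [pvRep_cons_pos q (d :: r') (c :: t0) hqn hpf]
            intro L hL hLp dd hdd
            obtain ⟨hLn, hLh, -, -⟩ := pvKB L (pvE18K L hL)
            cases L with
            | nil => exact absurd rfl hLn
            | cons L0 L1 =>
                have hL0 : L0 = '<' := by simpa using hLh
                rw [List.cons_append] at hLp
                have : L0 = d := (List.cons_prefix_cons.mp hLp).1
                have hdT := (hqr d (by rw [hr]; exact List.mem_cons_self ..)).1
                exact absurd (this ▸ hL0 ▸ pv_lt_mem_T) hdT
        | nil =>
            subst hr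
            have hq18 := hqe rfl
            rw [pvRep_cons_pos q [] (c :: t0) hqn hpf, List.nil_append]
            have hsucc := hne q hq18 (List.isPrefixOf_iff_prefix.mp hpf)
            cases ht2 : (c :: t0).drop q.length with
            | nil =>
                rw [pvRep_nil q [] hqn]
                intro L hL hLp d hd
                obtain ⟨hLn, -, -, -⟩ := pvKB L (pvE18K L hL)
                exact absurd (List.prefix_nil.mp hLp) hLn
            | cons e t2' =>
                have he : e ∉ pvT := hsucc e (by rw [ht2]; rfl)
                have hnf : q.isPrefixOf (e :: t2') = false := by
                  apply Bool.eq_false_iff.mpr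
                  intro hcp
                  cases q with
                  | nil => exact hqn rfl
                  | cons q0 q1 =>
                      have hq0 : q0 = '<' := by simpa using hqh
                      have := (List.cons_prefix_cons.mp (List.isPrefixOf_iff_prefix.mp hcp)).1
                      rw [hq0] at this
                      exact he (this ▸ pv_lt_mem_T)
                rw [pvRep_cons_neg q [] e t2' hqn hnf]
                intro L hL hLp d hd
                obtain ⟨hLn, hLh, -, -⟩ := pvKB L (pvE18K L hL)
                cases L with
                | nil => exact absurd rfl hLn
                | cons L0 L1 =>
                    have hL0 : L0 = '<' := by simpa using hLh
                    have := (List.cons_prefix_cons.mp hLp).1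
                    exact absurd (this ▸ hL0 ▸ pv_lt_mem_T) he
      · have hpf' : q.isPrefixOf (c :: t0) = false := Bool.eq_false_iff.mpr hpf
        rw [pvRep_cons_neg q r c t0 hqn hpf']
        intro L hL hLp d hd
        have hLkey := pvE18K L hL
        obtain ⟨hLn, hLh, hLlt, hLlen⟩ := pvKB L hLkey
        cases L with
        | nil => exact absurd rfl hLn
        | cons L0 L1 =>
            have hL0 : L0 = '<' := by simpa using hLh
            obtain ⟨hcL, hL1p⟩ := List.cons_prefix_cons.mp hLp
            have hc : c = '<' := by rw [← hcL, hL0]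
            have hinv0 := (pvInv_cons c t0).mp hinv
            have hne0 : NoEP t0 := hinv0.1 (hc ▸ pv_lt_mem_S)
            by_cases hL1 : L1 <+: t0
            · -- the literal was already there: its successor was safe and still is
              obtain ⟨t3, rfl⟩ := hL1
              have hLt : (L0 :: L1) <+: (c :: (L1 ++ t3)) :=
                List.cons_prefix_cons.mpr ⟨hL0.trans hc.symm, List.prefix_append _ _⟩
              have hsucc := hne (L0 :: L1) hL hLt
              have hdrop : ((c :: (L1 ++ t3)).drop (L0 :: L1).length) = t3 := by
                simp only [List.length_cons]
                rw [List.drop_succ_cons, List.drop_left]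
              rw [hdrop] at hsucc
              have hL1lt : '<' ∉ L1 := by simpa using hLlt
              have hskip : PySem.Chars.replace (L1 ++ t3) q r = L1 ++ PySem.Chars.replace t3 q r :=
                pvRep_skip q r L1 t3 hqh hqn hL1lt
              rw [hskip] at hd
              have hdrop2 : ((c :: (L1 ++ PySem.Chars.replace t3 q r)).drop (L0 :: L1).length)
                  = PySem.Chars.replace t3 q r := by
                simp only [List.length_cons]
                rw [List.drop_succ_cons, List.drop_left]
              rw [hdrop2] at hd
              cases ht3 : t3 with
              | nil => rw [ht3, pvRep_nil q r hqn] at hd; cases hd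
              | cons e t3' =>
                  rw [ht3] at hd
                  have he : e ∉ pvT := hsucc e (by rw [ht3]; rfl)
                  have hnf : q.isPrefixOf (e :: t3') = false := by
                    apply Bool.eq_false_iff.mpr
                    intro hcp
                    cases q with
                    | nil => exact hqn rfl
                    | cons q0 q1 =>
                        have hq0 : q0 = '<' := by simpa using hqh
                        have := (List.cons_prefix_cons.mp (List.isPrefixOf_iff_prefix.mp hcp)).1
                        rw [hq0] at this
                        exact he (this ▸ pv_lt_mem_T)
                  rw [pvRep_cons_neg q r e t3' hqn hnf] at hd
                  simp only [List.head?_cons, Option.some.injEq] at hd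
                  rw [← hd]
                  exact he
            · -- the literal is not there, and W says the pass cannot create it
              exfalso
              have hW := pvW t0.length t0 (L0 :: L1) 1 q r le_rfl hLkey le_rfl (by omega)
                ⟨hqkey, hqe, hqr⟩ hinv0.2 hne0
              rw [List.drop_succ_cons, List.drop_zero] at hW
              exact hW hL1 hL1p

-- the precondition is preserved by every pass
theorem pvInv_append_safe (r X : List Char) (hr : ∀ a ∈ r, a ∉ pvS) (hX : pvInv X = true) :
    pvInv (r ++ X) = true := by
  induction r with
  | nil => exact hX
  | cons a r' ih =>
      rw [List.cons_append]
      refine (pvInv_cons a (r' ++ X)).mpr ⟨?_, ih (fun b hb => hr b (List.mem_cons_of_mem _ hb))⟩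
      intro haS
      exact absurd haS (hr a (List.mem_cons_self ..))

theorem pvInvPass : ∀ n t q r, t.length ≤ n → PassOK q r → pvInv t = true →
    pvInv (PySem.Chars.replace t q r) = true := by
  intro n
  induction n with
  | zero =>
      intro t q r hlen hq hinv
      have ht : t = [] := List.length_eq_zero_iff.mp (Nat.le_zero.mp hlen)
      obtain ⟨hqkey, -, -⟩ := hq
      obtain ⟨hqn, -, -, -⟩ := pvKB q hqkey
      subst ht
      rw [pvRep_nil q r hqn]
      rfl
  | succ n ih =>
      intro t q r hlen hq hinv
      obtain ⟨hqkey, hqe, hqr⟩ := hq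
      obtain ⟨hqn, hqh, hqlt, hqlen⟩ := pvKB q hqkey
      cases t with
      | nil => rw [pvRep_nil q r hqn]; rfl
      | cons c t0 =>
          by_cases hpf : q.isPrefixOf (c :: t0) = true
          · obtain ⟨t2, ht2⟩ := List.isPrefixOf_iff_prefix.mp hpf
            rw [pvRep_cons_pos q r (c :: t0) hqn hpf]
            have hdrop : (c :: t0).drop q.length = t2 := by
              rw [← ht2, List.drop_left]
            rw [hdrop]
            have hinv2 : pvInv t2 = true := by
              rw [← ht2] at hinv
              exact pvInv_suffix q t2 hinv
            have hlen2 : t2.length ≤ n := by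
              have : q.length + t2.length = t0.length + 1 := by
                rw [← List.length_append, ht2]; rfl
              simp only [List.length_cons] at hlen
              omega
            have hX := ih t2 q r hlen2 ⟨hqkey, hqe, hqr⟩ hinv2
            exact pvInv_append_safe r _ (fun a ha => (hqr a ha).2) hX
          · have hpf' : q.isPrefixOf (c :: t0) = false := Bool.eq_false_iff.mpr hpf
            rw [pvRep_cons_neg q r c t0 hqn hpf']
            have hinv0 := (pvInv_cons c t0).mp hinv
            refine (pvInv_cons c _).mpr ⟨?_, ih t0 q r (by simp at hlen; omega) ⟨hqkey, hqe, hqr⟩ hinv0.2⟩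
            intro hcS
            exact pvNE t0 q r ⟨hqkey, hqe, hqr⟩ hinv0.2 (hinv0.1 hcS)

-- ---- fold lemmas over pass lists ----
theorem pvFold_nil : ∀ L, (∀ qr ∈ L, PassOK qr.1 qr.2) → List.foldl pvStep [] L = [] := by
  intro L
  induction L with
  | nil => intro _; rfl
  | cons qr L' ih =>
      intro h
      obtain ⟨hqkey, -, -⟩ := h qr (List.mem_cons_self ..)
      obtain ⟨hqn, -, -, -⟩ := pvKB qr.1 hqkey
      simp only [List.foldl_cons, pvStep]
      rw [pvRep_nil qr.1 qr.2 hqn]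
      exact ih (fun x hx => h x (List.mem_cons_of_mem _ hx))

theorem pvFold_cons_noLT : ∀ L, (∀ qr ∈ L, PassOK qr.1 qr.2) → ∀ c x, c ≠ '<' →
    List.foldl pvStep (c :: x) L = c :: List.foldl pvStep x L := by
  intro L
  induction L with
  | nil => intro _ c x _; rfl
  | cons qr L' ih =>
      intro h c x hc
      obtain ⟨hqkey, -, -⟩ := h qr (List.mem_cons_self ..)
      obtain ⟨hqn, hqh, -, -⟩ := pvKB qr.1 hqkey
      have hnp : qr.1.isPrefixOf (c :: x) = false := by
        apply Bool.eq_false_iff.mpr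
        intro hcp
        cases hq1 : qr.1 with
        | nil => exact hqn hq1
        | cons q0 q1 =>
            rw [hq1] at hcp hqh
            have hq0 : q0 = '<' := by simpa using hqh
            exact hc ((List.cons_prefix_cons.mp (List.isPrefixOf_iff_prefix.mp hcp)).1.symm.trans hq0)
      simp only [List.foldl_cons, pvStep]
      rw [pvRep_cons_neg qr.1 qr.2 c x hqn hnp]
      exact ih (fun y hy => h y (List.mem_cons_of_mem _ hy)) c _ hc

theorem pvFold_skip_noLT : ∀ L, (∀ qr ∈ L, PassOK qr.1 qr.2) → ∀ u x, '<' ∉ u →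
    List.foldl pvStep (u ++ x) L = u ++ List.foldl pvStep x L := by
  intro L
  induction L with
  | nil => intro _ u x _; rfl
  | cons qr L' ih =>
      intro h u x hu
      obtain ⟨hqkey, -, -⟩ := h qr (List.mem_cons_self ..)
      obtain ⟨hqn, hqh, -, -⟩ := pvKB qr.1 hqkey
      simp only [List.foldl_cons, pvStep]
      rw [pvRep_skip qr.1 qr.2 u x hqh hqn hu]
      exact ih (fun y hy => h y (List.mem_cons_of_mem _ hy)) u _ hu

theorem pvFold_phase1 : ∀ L, (∀ qr ∈ L, PassOK qr.1 qr.2 ∧ qr.1 ≠ p) → p ∈ pvKeysL → ∀ x,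
    List.foldl pvStep (p ++ x) L = p ++ List.foldl pvStep x L := by
  intro L
  induction L with
  | nil => intro _ _ x; rfl
  | cons qr L' ih =>
      intro h hp x
      obtain ⟨⟨hqkey, -, -⟩, hne⟩ := h qr (List.mem_cons_self ..)
      simp only [List.foldl_cons, pvStep]
      rw [pvRep_skip_pattern p qr.1 qr.2 x hp hqkey hne]
      exact ih (fun y hy => h y (List.mem_cons_of_mem _ hy)) hp _

-- the march: under the invariants, no pass touches a leading '<' that matches nothing
theorem pvMarch : ∀ L, (∀ qr ∈ L, PassOK qr.1 qr.2) → ∀ t, pvInv t = true → NoEP t →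
    (∀ p ∈ pvKeysL, ¬ (p.drop 1) <+: t) →
    List.foldl pvStep ('<' :: t) L = '<' :: List.foldl pvStep t L := by
  intro L
  induction L with
  | nil => intro _ t _ _ _; rfl
  | cons qr L' ih =>
      intro h t hinv hne htails
      have hqok := h qr (List.mem_cons_self ..)
      obtain ⟨hqkey, hqe, hqr⟩ := hqok
      obtain ⟨hqn, hqh, hqlt, hqlen⟩ := pvKB qr.1 hqkey
      have hnp : qr.1.isPrefixOf ('<' :: t) = false := by
        apply Bool.eq_false_iff.mpr
        intro hcp
        cases hq1 : qr.1 with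
        | nil => exact hqn hq1
        | cons q0 q1 =>
            rw [hq1] at hcp
            have hq1p : q1 <+: t := (List.cons_prefix_cons.mp (List.isPrefixOf_iff_prefix.mp hcp)).2
            have := htails qr.1 hqkey
            rw [hq1, List.drop_succ_cons, List.drop_zero] at this
            exact this hq1p
      simp only [List.foldl_cons, pvStep]
      rw [pvRep_cons_neg qr.1 qr.2 '<' t hqn hnp]
      refine ih (fun y hy => h y (List.mem_cons_of_mem _ hy)) (PySem.Chars.replace t qr.1 qr.2)
        (pvInvPass t.length t qr.1 qr.2 le_rfl ⟨hqkey, hqe, hqr⟩ hinv)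
        (pvNE t qr.1 qr.2 ⟨hqkey, hqe, hqr⟩ hinv hne) ?_
      intro p hp
      have h2len : 1 < p.length := by
        obtain ⟨-, -, -, hpl⟩ := pvKB p hp
        omega
      exact pvW t.length t p 1 qr.1 qr.2 le_rfl hp le_rfl h2len ⟨hqkey, hqe, hqr⟩ hinv hne (htails p hp)

-- the split: the 28 passes on (key ++ x) emit the key's merged replacement and recurse on x
theorem pvSplit (pr : List Char × List Char) (hpr : pr ∈ pvTableLit) (x : List Char) :
    List.foldl pvStep (pr.1 ++ x) pvL28L = pr.2 ++ List.foldl pvStep x pvL28L := by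
  have hkey : pr.1 ∈ pvKeysL := pvTK pr hpr
  obtain ⟨hpn, -, -, -⟩ := pvKB pr.1 hkey
  have hdw := pvTF pr hpr
  cases hd : pvL28L.dropWhile (fun qr => !(qr.1 == pr.1)) with
  | nil => rw [hd] at hdw; cases hdw
  | cons a l2 =>
      rw [hd] at hdw
      simp only [List.head?_cons, Option.some.injEq] at hdw
      rw [hdw] at hd
      have hsplit : pvL28L = pvL28L.takeWhile (fun qr => !(qr.1 == pr.1)) ++ (pr :: l2) := by
        rw [← hd, List.takeWhile_append_dropWhile]
      have hsub2 : ∀ qr ∈ l2, qr ∈ pvL28L := by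
        intro qr hqr
        rw [hsplit]
        exact List.mem_append_right _ (List.mem_cons_of_mem _ hqr)
      have hsub1 : ∀ qr ∈ pvL28L.takeWhile (fun qr => !(qr.1 == pr.1)), qr ∈ pvL28L := by
        intro qr hqr
        rw [hsplit]
        exact List.mem_append_left _ hqr
      conv_lhs => rw [hsplit]
      conv_rhs => rw [hsplit]
      rw [List.foldl_append, List.foldl_append]
      have hph1 : List.foldl pvStep (pr.1 ++ x) (pvL28L.takeWhile (fun qr => !(qr.1 == pr.1)))
          = pr.1 ++ List.foldl pvStep x (pvL28L.takeWhile (fun qr => !(qr.1 == pr.1))) := by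
        apply pvFold_phase1 _ _ hkey
        intro qr hqr
        refine ⟨pv_pass_ok qr (hsub1 qr hqr), ?_⟩
        have := List.mem_takeWhile_imp hqr
        simpa using this
      rw [hph1]
      set w := List.foldl pvStep x (pvL28L.takeWhile (fun qr => !(qr.1 == pr.1))) with hw
      simp only [List.foldl_cons, pvStep]
      have hstep : PySem.Chars.replace (pr.1 ++ w) pr.1 pr.2
          = pr.2 ++ PySem.Chars.replace w pr.1 pr.2 := by
        rw [pvRep_cons_pos pr.1 pr.2 (pr.1 ++ w) hpn
          (List.isPrefixOf_iff_prefix.mpr (List.prefix_append _ _))]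
        rw [List.drop_left]
      rw [hstep]
      have hval : '<' ∉ pr.2 := by
        intro hmem
        exact (pv_table_vals pr hpr '<' hmem).1 pv_lt_mem_T
      exact pvFold_skip_noLT l2 (fun y hy => pv_pass_ok y (hsub2 y hy)) pr.2 _ hval

-- ---- the main equivalence on lists ----
theorem pvMain : ∀ n s, s.length ≤ n → pvInv s = true →
    List.foldl pvStep s pvL28L = pvScan s := by
  intro n
  induction n with
  | zero =>
      intro s hlen _
      have hs : s = [] := List.length_eq_zero_iff.mp (Nat.le_zero.mp hlen)
      subst hs
      rw [pvFold_nil pvL28L pv_pass_ok]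
      simp [pvScan]
  | succ n ih =>
      intro s hlen hinv
      cases s with
      | nil =>
          rw [pvFold_nil pvL28L pv_pass_ok]
          simp [pvScan]
      | cons c t =>
          cases hfind : pvTableL.find? (fun pr => pr.1.isPrefixOf (c :: t)) with
          | some pr =>
              have hfind' : pvTableLit.find? (fun pr => pr.1.isPrefixOf (c :: t)) = some pr := by
                rw [← pvEQ1]; exact hfind
              have hmem := List.mem_of_find?_eq_some hfind'
              have hpf := List.find?_some hfind'
              have hscan : pvScan (c :: t) = pr.2 ++ pvScan ((c :: t).drop pr.1.length) := by
                conv_lhs => rw [pvScan]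
                rw [hfind]
              obtain ⟨rest, hrest⟩ := List.isPrefixOf_iff_prefix.mp hpf
              have hdrop : (c :: t).drop pr.1.length = rest := by rw [← hrest, List.drop_left]
              have hsp : List.foldl pvStep (c :: t) pvL28L
                  = pr.2 ++ List.foldl pvStep rest pvL28L := by
                rw [← hrest]
                exact pvSplit pr hmem rest
              rw [hscan, hdrop, hsp]
              refine congrArg (fun z => pr.2 ++ z) (ih rest ?_ ?_)
              · obtain ⟨-, -, -, hpl⟩ := pvKB pr.1 (pvTK pr hmem)
                have : pr.1.length + rest.length = t.length + 1 := by
                  rw [← List.length_append, hrest]; rfl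
                simp only [List.length_cons] at hlen
                omega
              · rw [← hrest] at hinv
                exact pvInv_suffix pr.1 rest hinv
          | none =>
              have hnone := List.find?_eq_none.mp hfind
              have hscan : pvScan (c :: t) = c :: pvScan t := by
                conv_lhs => rw [pvScan]
                rw [hfind]
              have hinv0 := (pvInv_cons c t).mp hinv
              have hlent : t.length ≤ n := by simp only [List.length_cons] at hlen; omega
              by_cases hc : c = '<'
              · subst hc
                have htails : ∀ p ∈ pvKeysL, ¬ (p.drop 1) <+: t := by
                  intro p hp
                  have hpm : ∃ pr ∈ pvTableLit, pr.1 = p := by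
                    rw [pvKM] at hp
                    obtain ⟨pr, hpr, hpr2⟩ := List.mem_map.mp hp
                    exact ⟨pr, hpr, hpr2⟩
                  obtain ⟨pr, hprm, rfl⟩ := hpm
                  have hnp := hnone pr (by rw [pvEQ1]; exact hprm)
                  obtain ⟨hpn, hph, -, -⟩ := pvKB pr.1 (pvTK pr hprm)
                  cases hp1 : pr.1 with
                  | nil => exact absurd hp1 hpn
                  | cons p0 p1 =>
                      rw [List.drop_succ_cons, List.drop_zero]
                      intro hpp
                      apply hnp
                      rw [hp1]
                      have hp0 : p0 = '<' := by rw [hp1] at hph; simpa using hph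
                      exact List.isPrefixOf_iff_prefix.mpr
                        (List.cons_prefix_cons.mpr ⟨hp0, hpp⟩)
                have hm := pvMarch pvL28L pv_pass_ok t hinv0.2 (hinv0.1 pv_lt_mem_S) htails
                rw [hscan, hm]
                exact congrArg (fun z => '<' :: z) (ih t hlent hinv0.2)
              · rw [hscan, pvFold_cons_noLT pvL28L pv_pass_ok c t hc]
                exact congrArg (fun z => c :: z) (ih t hlent hinv0.2)

-- ---- bridging the String-level ports to the list level ----
theorem pvPortA (output : String) :
    (format_irc output).toList = List.foldl pvStep output.toList pvL28 := by
  simp only [format_irc, pvTags, pvFormats, pvL28, List.foldl_cons, List.foldl_nil,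
    List.map_cons, List.map_nil, List.flatMap_cons, List.flatMap_nil, List.append_nil,
    List.cons_append, List.nil_append, pvStep, PySem.Str.replace, String.toList_ofList]

theorem pvPortB (output : String) :
    (format_irc_alt output).toList = pvScan output.toList := by
  simp only [format_irc_alt, String.toList_ofList]

-- ===== VERDICT (by name: the statement is the Claim_ definition above) =====
theorem format_irc_spec : Claim_equal_format_irc := by
  unfold Claim_equal_format_irc
  intro output _ hpre
  unfold Spec_format_irc
  apply String.toList_inj.mp
  rw [pvPortA, pvPortB, pvEQ2]
  exact pvMain output.toList.length output.toList le_rfl hpre
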